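-- pv_equiv track=rewrite | github.com/sam4ritan/mate-tracker | test.py | setzeHinzufuegenAnAnfang
-- ===== SOURCE A (Python) =====
-- def setzeHinzufuegenAnAnfang(zeitListe):
--     rueckgabe = []
--     for liste in zeitListe:
--         i = 1
--         while i < len(liste):
--             if (liste[i][1] > liste[i - 1][1]):
--                 for intern in range(i):
--                    liste[intern] = (liste[intern][0], liste[intern][1] + liste[i][1] - liste[i - 1][1])
--                 del liste[i]
--             i += 1
--         rueckgabe.append(liste)
--     return rueckgabe
-- ===== SOURCE B (Python) =====
-- def setzeHinzufuegenAnAnfang(zeitListe):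
--     # One forward pass per sublist: A's comparisons are always between adjacent
--     # ORIGINAL elements (a deletion at j makes A skip comparing j+1), so we can
--     # decide deletions and accumulate deltas in one pass, recording for each kept
--     # element the delta total seen so far; the final offset of a kept element is
--     # total - (deltas before it).  Does not mutate the input sublists.
--     rueckgabe = []
--     for liste in zeitListe:
--         gesamt = 0
--         behalten = []  # (paar, deltas accumulated before this position)
--         if liste:
--             behalten.append((liste[0], 0))
--         j = 1
--         n = len(liste)
--         while j < n:
--             a = liste[j - 1][1]
--             b = liste[j][1]
--             if b > a:
--                 gesamt += b - a
--                 if j + 1 < n: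
--                     behalten.append((liste[j + 1], gesamt))
--                 j += 2
--             else:
--                 behalten.append((liste[j], gesamt))
--                 j += 1
--         rueckgabe.append([(p[0], p[1] + gesamt - t) for (p, t) in behalten])
--     return rueckgabe
-- ===== Notes on version B (the rewrite author's own statement) =====
-- stated objective: faster
-- what changed: A repeatedly rewrites the whole prefix and deletes in place (quadratic per sublist); B does one forward pass that records each kept element together with the delta total seen so far, then applies the remaining (deferred) suffix delta in a single map.
import Mathlib
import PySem

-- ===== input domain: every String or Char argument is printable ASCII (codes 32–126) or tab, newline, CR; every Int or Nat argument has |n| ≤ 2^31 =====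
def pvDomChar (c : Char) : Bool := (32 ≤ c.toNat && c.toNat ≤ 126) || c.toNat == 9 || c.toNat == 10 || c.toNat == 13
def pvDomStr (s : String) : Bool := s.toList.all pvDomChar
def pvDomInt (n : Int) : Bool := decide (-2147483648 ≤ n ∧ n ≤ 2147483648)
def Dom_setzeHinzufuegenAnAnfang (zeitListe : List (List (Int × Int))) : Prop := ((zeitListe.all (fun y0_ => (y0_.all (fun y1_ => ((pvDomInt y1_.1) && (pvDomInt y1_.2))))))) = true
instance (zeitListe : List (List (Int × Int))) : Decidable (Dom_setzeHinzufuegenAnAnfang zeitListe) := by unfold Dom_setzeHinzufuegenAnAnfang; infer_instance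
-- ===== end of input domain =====

-- B replaces A's quadratic delete-and-rewrite-prefix loop by one forward pass per
-- sublist with a deferred offset (equivalence is about the RETURN value only:
-- A mutates its argument's sublists in place, B does not).

-- ===== PORT A =====
-- liste[intern] = (liste[intern][0], liste[intern][1] + d)
def pvAupd (d : Int) (l : List (Int × Int)) (j : Nat) : List (Int × Int) :=
  l.set j ((l.getD j (0, 0)).1, (l.getD j (0, 0)).2 + d)

theorem pvAupd_foldl_length (d : Int) (ns : List Nat) (l : List (Int × Int)) :
    (ns.foldl (pvAupd d) l).length = l.length := by
  induction ns generalizing l with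
  | nil => rfl
  | cons n ns ih => simp [List.foldl, ih, pvAupd, List.length_set]

-- the while-loop of A (state: current list, index i)
def pvAwhile (liste : List (Int × Int)) (i : Nat) : List (Int × Int) :=
  if h : i < liste.length then
    if (liste.getD i (0, 0)).2 > (liste.getD (i - 1) (0, 0)).2 then
      let d := (liste.getD i (0, 0)).2 - (liste.getD (i - 1) (0, 0)).2
      pvAwhile (((List.range i).foldl (pvAupd d) liste).eraseIdx i) (i + 1)
    else
      pvAwhile liste (i + 1)
  else liste
termination_by liste.length - i
decreasing_by
  · simp [List.length_eraseIdx, pvAupd_foldl_length, h]; omega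
  · omega

def setzeHinzufuegenAnAnfang (zeitListe : List (List (Int × Int))) : List (List (Int × Int)) :=
  zeitListe.map (fun liste => pvAwhile liste 1)

-- ===== PORT B =====
-- the while-loop of B (state: index j, running delta total, kept elements with
-- the delta total recorded at the time they were kept)
def pvBloop (liste : List (Int × Int)) (j : Nat) (gesamt : Int)
    (behalten : List ((Int × Int) × Int)) : List ((Int × Int) × Int) × Int :=
  if _h : j < liste.length then
    let a := (liste.getD (j - 1) (0, 0)).2
    let b := (liste.getD j (0, 0)).2
    if b > a then
      let g := gesamt + (b - a)
      pvBloop liste (j + 2) g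
        (if j + 1 < liste.length then behalten ++ [(liste.getD (j + 1) (0, 0), g)] else behalten)
    else
      pvBloop liste (j + 1) gesamt (behalten ++ [(liste.getD j (0, 0), gesamt)])
  else (behalten, gesamt)
termination_by liste.length - j

def setzeHinzufuegenAnAnfang_alt (zeitListe : List (List (Int × Int))) : List (List (Int × Int)) :=
  zeitListe.map (fun liste =>
    let init : List ((Int × Int) × Int) := match liste with | [] => [] | p :: _ => [(p, 0)]
    let res := pvBloop liste 1 0 init
    res.1.map (fun pt => (pt.1.1, pt.1.2 + res.2 - pt.2)))

-- ===== PRECONDITION & SPEC =====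
def Spec_setzeHinzufuegenAnAnfang (zeitListe : List (List (Int × Int))) (out : List (List (Int × Int))) : Prop := out = setzeHinzufuegenAnAnfang_alt zeitListe
instance (zeitListe : List (List (Int × Int))) (out : List (List (Int × Int))) : Decidable (Spec_setzeHinzufuegenAnAnfang zeitListe out) := by unfold Spec_setzeHinzufuegenAnAnfang; infer_instance

-- ===== CLAIM (what is proved, stated in full; the proofs are below) =====
def Claim_equal_setzeHinzufuegenAnAnfang : Prop := ∀ (zeitListe : List (List (Int × Int))), Dom_setzeHinzufuegenAnAnfang zeitListe → Spec_setzeHinzufuegenAnAnfang zeitListe (setzeHinzufuegenAnAnfang zeitListe)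

-- ===== LEMMAS AND PROOFS =====

def pvBump (d : Int) (p : Int × Int) : Int × Int := (p.1, p.2 + d)

-- common functional spec: given the previous (original) second component and the
-- remaining original suffix, return (processed survivors, total delta of the suffix)
def pvSpec : Int → List (Int × Int) → List (Int × Int) × Int
  | _, [] => ([], 0)
  | prev, x :: rest =>
    if x.2 > prev then
      match rest with
      | [] => ([], x.2 - prev)
      | y :: rest2 =>
        let rg := pvSpec y.2 rest2
        ((y.1, y.2 + rg.2) :: rg.1, rg.2 + (x.2 - prev))
    else
      let rg := pvSpec x.2 rest
      ((x.1, x.2 + rg.2) :: rg.1, rg.2)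

theorem pvBump_zero (l : List (Int × Int)) : l.map (pvBump 0) = l := by
  induction l with
  | nil => rfl
  | cons x xs ih => simp [pvBump, ih]

theorem pvUpd_range (d : Int) (L : List (Int × Int)) :
    ∀ i, i ≤ L.length →
      (List.range i).foldl (pvAupd d) L = (L.take i).map (pvBump d) ++ L.drop i := by
  intro i
  induction i with
  | zero => intro _; simp
  | succ i ih =>
    intro hi
    have hi' : i < L.length := by omega
    rw [List.range_succ, List.foldl_append, ih (by omega)]
    have hdrop : L.drop i = L[i] :: L.drop (i + 1) := (List.getElem_cons_drop hi').symm
    have hlenA : ((L.take i).map (pvBump d)).length = i := by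
      simp [List.length_take]; omega
    rw [hdrop]
    simp only [List.foldl_cons, List.foldl_nil, pvAupd]
    have hget : (((L.take i).map (pvBump d) ++ (L[i] :: L.drop (i + 1))).getD i (0, 0)) = L[i] := by
      rw [List.getD_eq_getElem?_getD, List.getElem?_append_right (by omega), hlenA]
      simp [List.getElem?_eq_getElem hi']
    rw [hget, List.set_append_right _ _ (by omega), hlenA]
    simp only [Nat.sub_self, List.set_cons_zero]
    have h2 : List.map (pvBump d) (L.take (i + 1))
        = List.map (pvBump d) (L.take i) ++ [(L[i].1, L[i].2 + d)] := by
      rw [List.map_take, List.take_add_one, List.getElem?_map, List.getElem?_eq_getElem hi']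
      simp [pvBump, List.map_take]
    rw [h2]
    simp

theorem pvGetD_append_cons (A : List (Int × Int)) (y : Int × Int) (t : List (Int × Int)) :
    (A ++ y :: t).getD A.length (0, 0) = y := by
  rw [List.getD_eq_getElem?_getD, List.getElem?_append_right (le_refl _)]; simp

theorem pvAwhile_eq (k : Nat) :
    ∀ (L : List (Int × Int)) (i : Nat), 1 ≤ i → L.length - i ≤ k →
      pvAwhile L i =
        (L.take i).map (pvBump (pvSpec (L.getD (i - 1) (0, 0)).2 (L.drop i)).2)
          ++ (pvSpec (L.getD (i - 1) (0, 0)).2 (L.drop i)).1 := by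
  induction k with
  | zero =>
    intro L i h1 hk
    have hge : ¬ i < L.length := by omega
    rw [pvAwhile, dif_neg hge, List.drop_eq_nil_of_le (by omega),
      List.take_of_length_le (by omega)]
    simp [pvSpec, pvBump_zero]
  | succ k ih =>
    intro L i h1 hk
    by_cases h : i < L.length
    · have hdropi : L.drop i = L[i] :: L.drop (i + 1) := (List.getElem_cons_drop h).symm
      have hgetI : L.getD i (0, 0) = L[i] := List.getD_eq_getElem L (0, 0) h
      rw [pvAwhile, dif_pos h, hdropi, hgetI]
      set prev := (L.getD (i - 1) (0, 0)).2 with hprev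
      by_cases hc : L[i].2 > prev
      · rw [if_pos hc]
        show pvAwhile (((List.range i).foldl (pvAupd (L[i].2 - prev)) L).eraseIdx i) (i + 1) = _
        set d := L[i].2 - prev with hd
        set A := (L.take i).map (pvBump d) with hA
        have hlenA : A.length = i := by simp [hA, List.length_take]; omega
        have herase : ((List.range i).foldl (pvAupd d) L).eraseIdx i = A ++ L.drop (i + 1) := by
          rw [pvUpd_range d L i (by omega), ← hA, hdropi,
            List.eraseIdx_append_of_length_le (by omega)]
          simp [hlenA]
        rw [herase]
        rcases hrest : L.drop (i + 1) with _ | ⟨y, rest2⟩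
        · -- nothing after the deleted element: the loop ends at once
          rw [List.append_nil]
          have hrec := ih A (i + 1) (by omega) (by omega)
          rw [List.drop_eq_nil_of_le (by omega), List.take_of_length_le (by omega)] at hrec
          rw [hrec]
          simp [pvSpec, hc, pvBump_zero, ← hA, ← hd]
        · -- an element follows the deleted one: A skips its comparison, it is kept
          have hi1 : i + 1 < L.length := by
            by_contra hcon
            rw [List.drop_eq_nil_of_le (by omega)] at hrest
            simp at hrest
          have hyr : L[i + 1] :: L.drop (i + 2) = y :: rest2 := by
            rw [List.getElem_cons_drop hi1, hrest]
          injection hyr with hy hrest2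
          have hr2len : rest2.length = L.length - (i + 2) := by
            rw [← hrest2, List.length_drop]
          have hrec := ih (A ++ y :: rest2) (i + 1) (by omega)
            (by simp [List.length_append, hlenA, hr2len]; omega)
          have hget2 : ((A ++ y :: rest2).getD (i + 1 - 1) (0, 0)) = y := by
            have h0 := pvGetD_append_cons A y rest2
            rw [hlenA] at h0
            simpa using h0
          have hdrop2 : (A ++ y :: rest2).drop (i + 1) = rest2 := by
            have h0 := List.drop_length_add_append (l₁ := A) (l₂ := y :: rest2) 1
            rw [hlenA] at h0
            simpa using h0
          have htake2 : (A ++ y :: rest2).take (i + 1) = A ++ [y] := by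
            rw [← hlenA, List.take_append]
            simp
          rw [hrec, hget2, hdrop2, htake2]
          simp [pvSpec, hc, hA, pvBump, List.map_append, ← hd]
          have hcomp : pvBump (pvSpec y.2 rest2).2 ∘ pvBump d = pvBump ((pvSpec y.2 rest2).2 + d) := by
            funext p; simp [pvBump]; ring
          rw [hcomp]
      · rw [if_neg hc]
        have hrec := ih L (i + 1) (by omega) (by omega)
        rw [hrec]
        simp only [Nat.add_sub_cancel, hgetI]
        have hspec2 : pvSpec prev (L[i] :: L.drop (i + 1))
            = ((L[i].1, L[i].2 + (pvSpec L[i].2 (L.drop (i + 1))).2) :: (pvSpec L[i].2 (L.drop (i + 1))).1,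
              (pvSpec L[i].2 (L.drop (i + 1))).2) := by
          rw [pvSpec.eq_def]
          simp [hc]
        rw [hspec2]
        rw [List.take_add_one, List.getElem?_eq_getElem h]
        simp only [Option.toList_some, List.map_append, List.map_cons, List.map_nil, pvBump,
          List.append_assoc, List.cons_append, List.nil_append]
    · rw [pvAwhile, dif_neg h, List.drop_eq_nil_of_le (by omega),
        List.take_of_length_le (by omega)]
      simp [pvSpec, pvBump_zero]

theorem pvBloop_eq (k : Nat) :
    ∀ (L : List (Int × Int)) (j : Nat) (gesamt : Int) (beh : List ((Int × Int) × Int)),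
      1 ≤ j → L.length - j ≤ k →
      (pvBloop L j gesamt beh).2
          = gesamt + (pvSpec (L.getD (j - 1) (0, 0)).2 (L.drop j)).2
        ∧ (pvBloop L j gesamt beh).1.map
            (fun pt => (pt.1.1, pt.1.2 + (pvBloop L j gesamt beh).2 - pt.2))
          = beh.map (fun pt =>
              (pt.1.1, pt.1.2 + (gesamt + (pvSpec (L.getD (j - 1) (0, 0)).2 (L.drop j)).2) - pt.2))
            ++ (pvSpec (L.getD (j - 1) (0, 0)).2 (L.drop j)).1 := by
  induction k with
  | zero =>
    intro L j gesamt beh h1 hk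
    have hge : ¬ j < L.length := by omega
    rw [pvBloop, dif_neg hge, List.drop_eq_nil_of_le (by omega)]
    simp [pvSpec]
  | succ k ih =>
    intro L j gesamt beh h1 hk
    by_cases hj : j < L.length
    · have hgetJ : L.getD j (0, 0) = L[j] := List.getD_eq_getElem L (0, 0) hj
      have hdropj : L.drop j = L[j] :: L.drop (j + 1) := (List.getElem_cons_drop hj).symm
      set prev := (L.getD (j - 1) (0, 0)).2 with hprev
      by_cases hc : L[j].2 > prev
      · set g := gesamt + (L[j].2 - prev) with hg
        have hstep : pvBloop L j gesamt beh
            = pvBloop L (j + 2) g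
                (if j + 1 < L.length then beh ++ [(L.getD (j + 1) (0, 0), g)] else beh) := by
          rw [pvBloop, dif_pos hj]
          simp only [hgetJ, ← hprev]
          rw [if_pos hc]
        by_cases hj1 : j + 1 < L.length
        · have hget1 : L.getD (j + 1) (0, 0) = L[j + 1] := List.getD_eq_getElem L (0, 0) hj1
          have hdropj1 : L.drop (j + 1) = L[j + 1] :: L.drop (j + 2) :=
            (List.getElem_cons_drop hj1).symm
          have hspecJ : pvSpec prev (L.drop j)
              = ((L[j + 1].1, L[j + 1].2 + (pvSpec L[j + 1].2 (L.drop (j + 2))).2)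
                    :: (pvSpec L[j + 1].2 (L.drop (j + 2))).1,
                 (pvSpec L[j + 1].2 (L.drop (j + 2))).2 + (L[j].2 - prev)) := by
            rw [hdropj, pvSpec.eq_def]
            simp only [hdropj1]
            simp [hc]
          obtain ⟨ih2, ih1⟩ := ih L (j + 2) g (beh ++ [(L.getD (j + 1) (0, 0), g)])
            (by omega) (by omega)
          simp only [show j + 2 - 1 = j + 1 from rfl, hget1] at ih2 ih1
          have hT : g + (pvSpec L[j + 1].2 (L.drop (j + 2))).2
              = gesamt + ((pvSpec L[j + 1].2 (L.drop (j + 2))).2 + (L[j].2 - prev)) := by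
            rw [hg]; ring
          rw [hT] at ih2 ih1
          constructor
          · rw [hstep, if_pos hj1, hget1, ih2, hspecJ]
          · rw [hstep, if_pos hj1, hget1, ih1, hspecJ]
            simp only [List.map_append, List.map_cons, List.map_nil]
            have harith : L[j + 1].2 + (gesamt + ((pvSpec L[j + 1].2 (L.drop (j + 2))).2 + (L[j].2 - prev))) - g
                = L[j + 1].2 + (pvSpec L[j + 1].2 (L.drop (j + 2))).2 := by
              rw [hg]; ring
            rw [harith, List.append_assoc]
            rfl
        · have hdrop1 : L.drop (j + 1) = [] := List.drop_eq_nil_of_le (by omega)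
          have hspecJ : pvSpec prev (L.drop j) = ([], L[j].2 - prev) := by
            rw [hdropj, pvSpec.eq_def]
            simp only [hdrop1]
            simp [hc]
          have hstop : pvBloop L (j + 2) g beh = (beh, g) := by
            rw [pvBloop, dif_neg (by omega)]
          constructor
          · rw [hstep, if_neg hj1, hstop, hspecJ, hg]
          · rw [hstep, if_neg hj1, hstop, hspecJ, hg]
            simp
      · have hstep : pvBloop L j gesamt beh
            = pvBloop L (j + 1) gesamt (beh ++ [(L.getD j (0, 0), gesamt)]) := by
          rw [pvBloop, dif_pos hj]
          simp only [hgetJ, ← hprev]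
          rw [if_neg hc]
        have hspecJ : pvSpec prev (L.drop j)
            = ((L[j].1, L[j].2 + (pvSpec L[j].2 (L.drop (j + 1))).2)
                  :: (pvSpec L[j].2 (L.drop (j + 1))).1,
               (pvSpec L[j].2 (L.drop (j + 1))).2) := by
          rw [hdropj, pvSpec.eq_def]
          simp [hc]
        obtain ⟨ih2, ih1⟩ := ih L (j + 1) gesamt (beh ++ [(L.getD j (0, 0), gesamt)])
          (by omega) (by omega)
        simp only [show j + 1 - 1 = j from rfl, hgetJ] at ih2 ih1
        constructor
        · rw [hstep, hgetJ, ih2, hspecJ]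
        · rw [hstep, hgetJ, ih1, hspecJ]
          simp only [List.map_append, List.map_cons, List.map_nil]
          have harith : L[j].2 + (gesamt + (pvSpec L[j].2 (L.drop (j + 1))).2) - gesamt
              = L[j].2 + (pvSpec L[j].2 (L.drop (j + 1))).2 := by ring
          rw [harith, List.append_assoc]
          rfl
    · have hge := hj
      rw [pvBloop, dif_neg hge, List.drop_eq_nil_of_le (by omega)]
      simp [pvSpec]

-- ===== VERDICT (by name: the statement is the Claim_ definition above) =====
theorem setzeHinzufuegenAnAnfang_spec : Claim_equal_setzeHinzufuegenAnAnfang := by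
  intro zl _
  unfold Spec_setzeHinzufuegenAnAnfang setzeHinzufuegenAnAnfang setzeHinzufuegenAnAnfang_alt
  refine (List.map_congr_left (fun L _ => ?_)).symm
  cases L with
  | nil =>
    show _ = pvAwhile [] 1
    rw [pvAwhile, dif_neg (by simp)]
    show ((pvBloop [] 1 0 []).1.map _) = []
    rw [pvBloop, dif_neg (by simp)]
    rfl
  | cons p t =>
    show ((pvBloop (p :: t) 1 0 [(p, (0 : Int))]).1.map
        (fun pt => (pt.1.1, pt.1.2 + (pvBloop (p :: t) 1 0 [(p, (0 : Int))]).2 - pt.2)))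
      = pvAwhile (p :: t) 1
    have hA := pvAwhile_eq (p :: t).length (p :: t) 1 (le_refl 1) (by omega)
    obtain ⟨-, h1⟩ := pvBloop_eq (p :: t).length (p :: t) 1 0 [(p, 0)] (le_refl 1) (by omega)
    rw [hA, h1]
    simp [pvBump]
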